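-- pv_equiv track=rewrite | github.com/miac-design/rackspace-prospect-scanner | outputs/html_updater.py | _generate_use_case_tags
-- ===== SOURCE A (Python) =====
-- from typing import List, Dict
--
-- def _generate_use_case_tags(prospect: Dict) -> str:
--     """Generate use-case tag HTML based on prospect data."""
--     tags = []
--     text = f"{prospect.get('rackspace_wedge', '')} {prospect.get('ai_agent_use_case', '')} {prospect.get('signal', '')}".lower()
--
--     if any(kw in text for kw in ['ai', 'ml', 'machine learning', 'genai', 'llm']):
--         tags.append('<span class="use-case-tag ai-analytics">AI Analytics</span>')
--     if any(kw in text for kw in ['hipaa', 'compliance', 'pci', 'sox', 'regulatory']):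
--         tags.append('<span class="use-case-tag compliance">Compliance</span>')
--     if any(kw in text for kw in ['migration', 'hybrid', 'cloud']):
--         tags.append('<span class="use-case-tag hybrid-migration">Hybrid Migration</span>')
--     if any(kw in text for kw in ['secure', 'security', 'hosting', 'private cloud']):
--         tags.append('<span class="use-case-tag secure-hosting">Secure Hosting</span>')
--     if any(kw in text for kw in ['fraud', 'detection', 'anomaly']):
--         tags.append('<span class="use-case-tag fraud-detection">Fraud Detection</span>')
--
--     if not tags:
--         tags.append('<span class="use-case-tag ai-analytics">AI Analytics</span>')
--
--     return f'<div class="use-case-tags">{" ".join(tags)}</div>'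
-- ===== SOURCE B (Python) =====
-- # B: text-driven single scan (naive multi-pattern match) — walk the lowered text
-- # once, and at each position mark every category that has a keyword starting there;
-- # A instead runs a separate substring search per keyword, category by category.
-- _TAGS = [
--     '<span class="use-case-tag ai-analytics">AI Analytics</span>',
--     '<span class="use-case-tag compliance">Compliance</span>',
--     '<span class="use-case-tag hybrid-migration">Hybrid Migration</span>',
--     '<span class="use-case-tag secure-hosting">Secure Hosting</span>',
--     '<span class="use-case-tag fraud-detection">Fraud Detection</span>',
-- ]
-- _KWS = [
--     ['ai', 'ml', 'machine learning', 'genai', 'llm'],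
--     ['hipaa', 'compliance', 'pci', 'sox', 'regulatory'],
--     ['migration', 'hybrid', 'cloud'],
--     ['secure', 'security', 'hosting', 'private cloud'],
--     ['fraud', 'detection', 'anomaly'],
-- ]
--
--
-- def _generate_use_case_tags(prospect):
--     text = f"{prospect.get('rackspace_wedge', '')} {prospect.get('ai_agent_use_case', '')} {prospect.get('signal', '')}".lower()
--     hits = [False] * 5
--     for i in range(len(text)):
--         for c in range(5):
--             hits[c] = hits[c] or any(text.startswith(kw, i) for kw in _KWS[c])
--     tags = [_TAGS[c] for c in range(5) if hits[c]]
--     if not tags: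
--         tags.append(_TAGS[0])
--     return f'<div class="use-case-tags">{" ".join(tags)}</div>'
-- ===== Notes on version B (the rewrite author's own statement) =====
-- stated objective: alternative
-- what changed: Replaces A's pattern-driven per-keyword substring searches (five unrolled any(kw in text) conditionals) with a text-driven single scan: one pass over the positions of the lowered text marks, per position, every category with a keyword starting there (a naive multi-pattern matcher over a hit mask), and the tags are then read off the mask in category order.
import Mathlib
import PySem

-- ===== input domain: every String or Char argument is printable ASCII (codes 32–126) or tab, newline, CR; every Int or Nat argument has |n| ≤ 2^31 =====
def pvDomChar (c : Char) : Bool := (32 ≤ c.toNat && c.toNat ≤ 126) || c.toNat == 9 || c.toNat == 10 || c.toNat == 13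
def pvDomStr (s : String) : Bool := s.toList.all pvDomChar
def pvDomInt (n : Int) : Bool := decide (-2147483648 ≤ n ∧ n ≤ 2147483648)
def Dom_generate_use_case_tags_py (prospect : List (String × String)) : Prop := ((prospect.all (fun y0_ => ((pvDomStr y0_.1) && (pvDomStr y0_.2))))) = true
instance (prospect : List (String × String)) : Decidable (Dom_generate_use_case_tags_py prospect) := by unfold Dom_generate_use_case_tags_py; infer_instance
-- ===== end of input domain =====

-- B replaces A's five per-keyword substring searches by one text-driven scan that marks,
-- at each position of the lowered text, the categories whose keyword starts there; objective: alternative.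

-- ===== PORT A =====
-- the lowered concatenation of the three prospect fields (the f-string line, identical in both Pythons)
def pvTagText (prospect : List (String × String)) : String :=
  let d := PySem.Dict.mk prospect
  PySem.Str.lower (d.getD "rackspace_wedge" "" ++ " " ++ d.getD "ai_agent_use_case" "" ++ " " ++ d.getD "signal" "")

-- the five unrolled conditionals of A, over the already-built text
def pvTagsA (text : String) : List String :=
  let tags : List String := []
  let tags := if ["ai", "ml", "machine learning", "genai", "llm"].any (fun kw => PySem.Str.isIn kw text) then tags ++ ["<span class=\"use-case-tag ai-analytics\">AI Analytics</span>"] else tags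
  let tags := if ["hipaa", "compliance", "pci", "sox", "regulatory"].any (fun kw => PySem.Str.isIn kw text) then tags ++ ["<span class=\"use-case-tag compliance\">Compliance</span>"] else tags
  let tags := if ["migration", "hybrid", "cloud"].any (fun kw => PySem.Str.isIn kw text) then tags ++ ["<span class=\"use-case-tag hybrid-migration\">Hybrid Migration</span>"] else tags
  let tags := if ["secure", "security", "hosting", "private cloud"].any (fun kw => PySem.Str.isIn kw text) then tags ++ ["<span class=\"use-case-tag secure-hosting\">Secure Hosting</span>"] else tags
  let tags := if ["fraud", "detection", "anomaly"].any (fun kw => PySem.Str.isIn kw text) then tags ++ ["<span class=\"use-case-tag fraud-detection\">Fraud Detection</span>"] else tags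
  if tags.isEmpty then tags ++ ["<span class=\"use-case-tag ai-analytics\">AI Analytics</span>"] else tags

def generate_use_case_tags_py (prospect : List (String × String)) : String :=
  "<div class=\"use-case-tags\">" ++ PySem.Str.join " " (pvTagsA (pvTagText prospect)) ++ "</div>"

-- ===== PORT B =====
-- B's _TAGS table
def pvTagList : List String :=
  [ "<span class=\"use-case-tag ai-analytics\">AI Analytics</span>",
    "<span class=\"use-case-tag compliance\">Compliance</span>",
    "<span class=\"use-case-tag hybrid-migration\">Hybrid Migration</span>",
    "<span class=\"use-case-tag secure-hosting\">Secure Hosting</span>",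
    "<span class=\"use-case-tag fraud-detection\">Fraud Detection</span>" ]

-- B's _KWS table
def pvKwsB : List (List String) :=
  [ ["ai", "ml", "machine learning", "genai", "llm"],
    ["hipaa", "compliance", "pci", "sox", "regulatory"],
    ["migration", "hybrid", "cloud"],
    ["secure", "security", "hosting", "private cloud"],
    ["fraud", "detection", "anomaly"] ]

-- `any(text.startswith(kw, i) for kw in _KWS[c])`; text.startswith(kw, i) with 0 ≤ i < len(text)
-- is exactly 'kw is a prefix of text dropped by i' (ported by hand: PySem.Str.startswith has no start argument)
def pvMatchAt (cs : List Char) (i : Nat) (c : Nat) : Bool :=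
  (pvKwsB.getD c []).any (fun kw => PySem.Chars.startswith (cs.drop i) kw.toList)

-- the inner `for c in range(5): hits[c] = hits[c] or any(...)`
def pvInner (cs : List Char) (i : Nat) (hits : List Bool) : List Bool :=
  (List.range 5).foldl (fun h c => h.set c ((h.getD c false) || pvMatchAt cs i c)) hits

-- the outer `for i in range(len(text))` scan over the text positions
def pvScan (cs : List Char) : List Bool :=
  (List.range cs.length).foldl (fun hits i => pvInner cs i hits) [false, false, false, false, false]

-- B's tag construction: read the hit mask produced by the scan, in category order, with the fallback
def pvTagsB (text : String) : List String :=
  let hits := pvScan text.toList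
  let tags := (List.range 5).filterMap (fun c => if hits.getD c false then some (pvTagList.getD c "") else none)
  if tags.isEmpty then tags ++ [pvTagList.getD 0 ""] else tags

def generate_use_case_tags_py_alt (prospect : List (String × String)) : String :=
  "<div class=\"use-case-tags\">" ++ PySem.Str.join " " (pvTagsB (pvTagText prospect)) ++ "</div>"

-- ===== PRECONDITION & SPEC =====
def Spec_generate_use_case_tags_py (prospect : List (String × String)) (out : String) : Prop := out = generate_use_case_tags_py_alt prospect
instance (prospect : List (String × String)) (out : String) : Decidable (Spec_generate_use_case_tags_py prospect out) := by unfold Spec_generate_use_case_tags_py; infer_instance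

-- ===== CLAIM (what is proved, stated in full; the proofs are below) =====
def Claim_equal_generate_use_case_tags_py : Prop := ∀ (prospect : List (String × String)), Dom_generate_use_case_tags_py prospect → Spec_generate_use_case_tags_py prospect (generate_use_case_tags_py prospect)

-- ===== LEMMAS AND PROOFS =====

-- one pass of the inner loop over a 5-element hits list
theorem pvInner_eq (cs : List Char) (i : Nat) (b0 b1 b2 b3 b4 : Bool) :
    pvInner cs i [b0, b1, b2, b3, b4] =
      [b0 || pvMatchAt cs i 0, b1 || pvMatchAt cs i 1, b2 || pvMatchAt cs i 2,
       b3 || pvMatchAt cs i 3, b4 || pvMatchAt cs i 4] := rfl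

-- invariant of the outer scan: hits[c] = 'some position among the first n matched category c'
theorem pvScan_general (cs : List Char) (n : Nat) :
    (List.range n).foldl (fun hits i => pvInner cs i hits) [false, false, false, false, false] =
      [ (List.range n).any (fun i => pvMatchAt cs i 0),
        (List.range n).any (fun i => pvMatchAt cs i 1),
        (List.range n).any (fun i => pvMatchAt cs i 2),
        (List.range n).any (fun i => pvMatchAt cs i 3),
        (List.range n).any (fun i => pvMatchAt cs i 4) ] := by
  induction n with
  | zero => rfl
  | succ n ih =>
      rw [List.range_succ, List.foldl_append, ih]
      simp [pvInner_eq, List.any_append]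

-- 'some position of cs starts with a nonempty kw from kws' = 'some kw of kws is a substring of cs'
theorem pvEntry (cs : List Char) (kws : List String) (h : ∀ kw ∈ kws, kw.toList ≠ []) :
    ((List.range cs.length).any (fun i => kws.any (fun kw => PySem.Chars.startswith (cs.drop i) kw.toList)))
      = kws.any (fun kw => PySem.Chars.isIn kw.toList cs) := by
  rw [Bool.eq_iff_iff]
  simp only [List.any_eq_true, List.mem_range]
  constructor
  · rintro ⟨i, _, kw, hkw, hs⟩
    exact ⟨kw, hkw, (PySem.Chars.exists_prefix_drop_iff_isIn _ _).mp
      ⟨i, (PySem.Chars.startswith_iff _ _).mp hs⟩⟩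
  · rintro ⟨kw, hkw, hin⟩
    obtain ⟨j, hp⟩ := (PySem.Chars.exists_prefix_drop_iff_isIn _ _).mpr hin
    by_cases hj : j < cs.length
    · exact ⟨j, hj, kw, hkw, (PySem.Chars.startswith_iff _ _).mpr hp⟩
    · exfalso
      apply h kw hkw
      have : cs.drop j = [] := List.drop_eq_nil_iff.mpr (le_of_not_gt hj)
      rw [this] at hp
      exact List.prefix_nil.mp hp

-- the scan computes exactly A's five 'any keyword in text' conditions
theorem pvScan_closed (t : String) :
    pvScan t.toList =
      [ ["ai", "ml", "machine learning", "genai", "llm"].any (fun kw => PySem.Str.isIn kw t),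
        ["hipaa", "compliance", "pci", "sox", "regulatory"].any (fun kw => PySem.Str.isIn kw t),
        ["migration", "hybrid", "cloud"].any (fun kw => PySem.Str.isIn kw t),
        ["secure", "security", "hosting", "private cloud"].any (fun kw => PySem.Str.isIn kw t),
        ["fraud", "detection", "anomaly"].any (fun kw => PySem.Str.isIn kw t) ] := by
  unfold pvScan
  rw [pvScan_general]
  have h0 : (fun i => pvMatchAt t.toList i 0) = (fun i => (["ai", "ml", "machine learning", "genai", "llm"] : List String).any (fun kw => PySem.Chars.startswith (t.toList.drop i) kw.toList)) := rfl
  have h1 : (fun i => pvMatchAt t.toList i 1) = (fun i => (["hipaa", "compliance", "pci", "sox", "regulatory"] : List String).any (fun kw => PySem.Chars.startswith (t.toList.drop i) kw.toList)) := rfl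
  have h2 : (fun i => pvMatchAt t.toList i 2) = (fun i => (["migration", "hybrid", "cloud"] : List String).any (fun kw => PySem.Chars.startswith (t.toList.drop i) kw.toList)) := rfl
  have h3 : (fun i => pvMatchAt t.toList i 3) = (fun i => (["secure", "security", "hosting", "private cloud"] : List String).any (fun kw => PySem.Chars.startswith (t.toList.drop i) kw.toList)) := rfl
  have h4 : (fun i => pvMatchAt t.toList i 4) = (fun i => (["fraud", "detection", "anomaly"] : List String).any (fun kw => PySem.Chars.startswith (t.toList.drop i) kw.toList)) := rfl
  rw [h0, h1, h2, h3, h4, pvEntry _ _ (by decide), pvEntry _ _ (by decide),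
      pvEntry _ _ (by decide), pvEntry _ _ (by decide), pvEntry _ _ (by decide)]
  simp [PySem.Str.isIn_eq]

-- A's five unrolled appends and B's mask reading agree for every 5-bit mask
theorem pvCombine (b0 b1 b2 b3 b4 : Bool) :
    (let tags : List String := []
     let tags := if b0 then tags ++ ["<span class=\"use-case-tag ai-analytics\">AI Analytics</span>"] else tags
     let tags := if b1 then tags ++ ["<span class=\"use-case-tag compliance\">Compliance</span>"] else tags
     let tags := if b2 then tags ++ ["<span class=\"use-case-tag hybrid-migration\">Hybrid Migration</span>"] else tags
     let tags := if b3 then tags ++ ["<span class=\"use-case-tag secure-hosting\">Secure Hosting</span>"] else tags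
     let tags := if b4 then tags ++ ["<span class=\"use-case-tag fraud-detection\">Fraud Detection</span>"] else tags
     if tags.isEmpty then tags ++ ["<span class=\"use-case-tag ai-analytics\">AI Analytics</span>"] else tags)
    = (let tags := (List.range 5).filterMap (fun c => if [b0, b1, b2, b3, b4].getD c false then some (pvTagList.getD c "") else none)
       if tags.isEmpty then tags ++ [pvTagList.getD 0 ""] else tags) := by
  cases b0 <;> cases b1 <;> cases b2 <;> cases b3 <;> cases b4 <;> rfl

-- the two tag lists agree for every text
theorem pvTags_eq (t : String) : pvTagsA t = pvTagsB t := by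
  unfold pvTagsA pvTagsB
  rw [pvScan_closed]
  exact pvCombine _ _ _ _ _

-- ===== VERDICT (by name: the statement is the Claim_ definition above) =====
theorem generate_use_case_tags_py_spec : Claim_equal_generate_use_case_tags_py := by
  intro prospect _
  unfold Spec_generate_use_case_tags_py generate_use_case_tags_py generate_use_case_tags_py_alt
  rw [pvTags_eq]
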